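-- pv_equiv track=rewrite | github.com/AtreuhLaicram/pyCode | suitable_rooms.py | solution
-- ===== SOURCE A (Python) =====
-- def solution(matrix):
--     sumofsr = 0
--     hounted_rooms = list(map(list, zip(*matrix)))
--     for hounted_floor in hounted_rooms:
--         for is_suitable in hounted_floor:
--             if is_suitable != 0:
--                 sumofsr += is_suitable
--             else:
--                 break
--     return sumofsr
-- ===== SOURCE B (Python) =====
-- def _step(st, v):
--     s, a = st
--     if not a:
--         return st
--     if v != 0:
--         return (s + v, True)
--     return (s, False)
--
--
-- def solution(matrix):
--     ncols = min(map(len, matrix), default=0)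
--     state = [(0, True)] * ncols
--     for row in matrix:
--         state = [_step(st, v) for st, v in zip(state, row)]
--     return sum(s for s, _ in state)
-- ===== Notes on version B (the rewrite author's own statement) =====
-- stated objective: alternative
-- what changed: Instead of transposing the matrix and summing each column's prefix until its first zero, B makes a single row-major pass keeping one (partial sum, still-active) pair per column and updating all columns with each row.
import Mathlib
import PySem

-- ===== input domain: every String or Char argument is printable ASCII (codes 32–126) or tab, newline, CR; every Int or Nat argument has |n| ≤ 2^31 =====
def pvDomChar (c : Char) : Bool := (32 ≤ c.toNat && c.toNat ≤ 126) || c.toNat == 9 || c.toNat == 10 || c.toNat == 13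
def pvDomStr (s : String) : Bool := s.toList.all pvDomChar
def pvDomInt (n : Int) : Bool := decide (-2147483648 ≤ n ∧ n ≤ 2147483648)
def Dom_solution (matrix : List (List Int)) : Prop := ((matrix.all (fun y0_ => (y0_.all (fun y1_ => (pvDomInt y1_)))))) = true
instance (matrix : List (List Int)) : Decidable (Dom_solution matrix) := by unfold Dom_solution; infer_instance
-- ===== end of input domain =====

-- B replaces A's transpose-then-column-scan by a single row-major pass keeping a
-- (partial sum, still-active) pair per column: an alternative decomposition, same cost.

-- ===== PORT A =====
-- shared helper: the number of columns zip(*matrix) keeps = min row length (0 for no rows);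
-- exact since both zip(*matrix) and min(map(len, m), default=0) truncate to the shortest row
def minLen : List (List Int) → Nat
  | [] => 0
  | [r] => r.length
  | r :: s :: rs => min r.length (minLen (s :: rs))

-- the inner 'for … break' loop of A: add while nonzero, stop at the first zero
def sumCol (s : Int) : List Int → Int
  | [] => s
  | v :: vs => if v ≠ 0 then sumCol (s + v) vs else s

-- zip(*matrix) ported as (range (minLen m)).map of the j-th entry of every row; exact because
-- j < minLen m ≤ length of every row, so getD never takes its default
def solution (matrix : List (List Int)) : Int :=
  let hounted_rooms := (List.range (minLen matrix)).map (fun j => matrix.map (fun r => r.getD j 0))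
  hounted_rooms.foldl sumCol 0

-- ===== PORT B =====
-- _step of Source B on one column state (partial sum, active) and the row's value in that column
def step (st : Int × Bool) (v : Int) : Int × Bool :=
  if st.2 = false then st
  else if v ≠ 0 then (st.1 + v, true) else (st.1, false)

-- one row of Source B's loop: [_step(st, v) for st, v in zip(state, row)]
def rowStep (st : List (Int × Bool)) (row : List Int) : List (Int × Bool) :=
  (st.zip row).map (fun p => step p.1 p.2)

def solution_alt (matrix : List (List Int)) : Int :=
  let ncols := minLen matrix
  let state := matrix.foldl rowStep (List.replicate ncols (0, true))
  (state.map Prod.fst).sum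

-- ===== PRECONDITION & SPEC =====
def Spec_solution (matrix : List (List Int)) (out : Int) : Prop := out = solution_alt matrix
instance (matrix : List (List Int)) (out : Int) : Decidable (Spec_solution matrix out) := by unfold Spec_solution; infer_instance

-- ===== CLAIM (what is proved, stated in full; the proofs are below) =====
def Claim_equal_solution : Prop := ∀ (matrix : List (List Int)), Dom_solution matrix → Spec_solution matrix (solution matrix)

-- ===== LEMMAS AND PROOFS =====

theorem minLen_le {m : List (List Int)} {r : List Int} (h : r ∈ m) : minLen m ≤ r.length := by
  induction m with
  | nil => cases h
  | cons a t ih =>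
    cases t with
    | nil =>
      rcases List.mem_cons.mp h with h | h
      · subst h; simp [minLen]
      · cases h
    | cons b u =>
      rcases List.mem_cons.mp h with h | h
      · subst h; simp [minLen]
      · exact le_trans (by simp [minLen]) (ih h)

theorem foldl_step_false (l : List Int) (s : Int) : l.foldl step (s, false) = (s, false) := by
  induction l with
  | nil => rfl
  | cons v vs ih => simpa [step] using ih

theorem sumCol_eq_foldl (col : List Int) (s : Int) :
    sumCol s col = (col.foldl step (s, true)).1 := by
  induction col generalizing s with
  | nil => rfl
  | cons v vs ih =>
    by_cases hv : v = 0
    · simp [sumCol, step, hv, foldl_step_false]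
    · simp [sumCol, step, hv, ih]

theorem sumCol_shift (col : List Int) (s t : Int) :
    sumCol (s + t) col = s + sumCol t col := by
  induction col generalizing t with
  | nil => rfl
  | cons v vs ih =>
    by_cases hv : v = 0
    · simp [sumCol, hv]
    · simpa [sumCol, hv, add_assoc] using ih (t + v)

theorem foldl_sumCol (cols : List (List Int)) (a : Int) :
    cols.foldl sumCol a = a + (cols.map (sumCol 0)).sum := by
  induction cols generalizing a with
  | nil => simp
  | cons c cs ih =>
    have : sumCol a c = a + sumCol 0 c := by simpa using sumCol_shift c a 0
    simp [List.foldl_cons, ih, this, add_assoc]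

theorem length_rowStep (st : List (Int × Bool)) (row : List Int)
    (h : st.length ≤ row.length) : (rowStep st row).length = st.length := by
  simp [rowStep, List.length_zip, Nat.min_eq_left h]

theorem rowStep_getD (st : List (Int × Bool)) (row : List Int) {j : Nat}
    (h : st.length ≤ row.length) (hj : j < st.length) :
    (rowStep st row).getD j (0, true) = step (st.getD j (0, true)) (row.getD j 0) := by
  have hjr : j < row.length := lt_of_lt_of_le hj h
  have hz : j < (st.zip row).length := by simp [List.length_zip]; omega
  simp [rowStep, List.getD, List.getElem?_map,
        List.getElem?_eq_getElem hj, List.getElem?_eq_getElem hjr,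
        List.getElem?_eq_getElem hz]

-- the row-major fold decomposes into independent per-column folds
theorem foldl_rowStep (rs : List (List Int)) (st : List (Int × Bool))
    (h : ∀ r ∈ rs, st.length ≤ r.length) :
    rs.foldl rowStep st =
      (List.range st.length).map
        (fun j => (rs.map (fun r => r.getD j 0)).foldl step (st.getD j (0, true))) := by
  induction rs generalizing st with
  | nil =>
    apply List.ext_getElem
    · simp
    · intro i h1 h2
      have hi : i < st.length := by simpa using h1
      simp [List.getD, List.getElem?_eq_getElem hi]
  | cons row rest ih =>
    have hrow : st.length ≤ row.length := h row (by simp)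
    have hlen : (rowStep st row).length = st.length := length_rowStep st row hrow
    have hrest : ∀ r ∈ rest, (rowStep st row).length ≤ r.length := by
      intro r hr; rw [hlen]; exact h r (by simp [hr])
    rw [List.foldl_cons, ih (rowStep st row) hrest, hlen]
    refine List.map_congr_left ?_
    intro j hj
    rw [rowStep_getD st row hrow (List.mem_range.mp hj)]
    simp

-- ===== VERDICT (by name: the statement is the Claim_ definition above) =====
theorem solution_spec : Claim_equal_solution := by
  intro matrix _
  show solution matrix = solution_alt matrix
  rw [show solution matrix =
        ((List.range (minLen matrix)).map (fun j => matrix.map (fun r => r.getD j 0))).foldl sumCol 0 from rfl,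
      show solution_alt matrix =
        ((matrix.foldl rowStep (List.replicate (minLen matrix) (0, true))).map Prod.fst).sum from rfl]
  have hmem : ∀ r ∈ matrix, (List.replicate (minLen matrix) ((0 : Int), true)).length ≤ r.length := by
    intro r hr; simpa using minLen_le hr
  rw [foldl_rowStep matrix _ hmem]
  simp only [List.length_replicate, List.map_map]
  rw [foldl_sumCol]
  simp [Function.comp_def, sumCol_eq_foldl]
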